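-- pv_equiv track=rewrite | github.com/sgttomas/chirality-piping | tools/drawing_extract/flag_merge_conflicts.py | _discover_paired_columns
-- ===== SOURCE A (Python) =====
-- EXTRACTED_SUFFIX = "_extracted"
--
-- EXISTING_SUFFIX = "_existing"
--
-- def _discover_paired_columns(fieldnames: list[str]) -> list[str]:
--     """Return the sorted set of base column names that have both
--     {col}_extracted and {col}_existing variants in fieldnames."""
--     extracted_bases = {
--         name[: -len(EXTRACTED_SUFFIX)]
--         for name in fieldnames
--         if name.endswith(EXTRACTED_SUFFIX)
--     }
--     existing_bases = {
--         name[: -len(EXISTING_SUFFIX)]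
--         for name in fieldnames
--         if name.endswith(EXISTING_SUFFIX)
--     }
--     return sorted(extracted_bases & existing_bases)
-- ===== SOURCE B (Python) =====
-- def _discover_paired_columns(fieldnames: list[str]) -> list[str]:
--     """Single pass: record per base which of the two suffixes occur, then
--     keep the bases that have both."""
--     flags = {}
--     for name in fieldnames:
--         if name.endswith("_extracted"):
--             base = name[: -len("_extracted")]
--             e, x = flags.get(base, (False, False))
--             flags[base] = (True, x)
--         if name.endswith("_existing"):
--             base = name[: -len("_existing")]
--             e, x = flags.get(base, (False, False))
--             flags[base] = (e, True)
--     return sorted(base for base, (e, x) in flags.items() if e and x)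
-- ===== Notes on version B (the rewrite author's own statement) =====
-- stated objective: alternative
-- what changed: Replaces the two set comprehensions plus set intersection with a single loop that builds a dict mapping each base to a (has_extracted, has_existing) flag pair, then filters and sorts the bases with both flags set.
import Mathlib
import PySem

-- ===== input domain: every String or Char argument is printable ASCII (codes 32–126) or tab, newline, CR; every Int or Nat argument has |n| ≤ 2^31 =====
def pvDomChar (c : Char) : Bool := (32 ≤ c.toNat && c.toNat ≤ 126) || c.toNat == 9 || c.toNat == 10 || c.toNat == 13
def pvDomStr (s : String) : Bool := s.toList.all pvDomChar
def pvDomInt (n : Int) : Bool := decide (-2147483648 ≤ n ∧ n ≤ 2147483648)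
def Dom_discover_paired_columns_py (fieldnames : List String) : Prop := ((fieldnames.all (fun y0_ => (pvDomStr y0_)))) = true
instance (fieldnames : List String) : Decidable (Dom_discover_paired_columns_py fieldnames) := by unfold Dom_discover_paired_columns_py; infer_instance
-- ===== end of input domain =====

-- B builds, in a single pass, a dict base ↦ (has _extracted, has _existing) and returns the
-- sorted bases with both flags set, instead of A's two set comprehensions plus intersection.

-- ===== PORT A =====
-- name[:-len("_extracted")] / name[:-len("_existing")]
def stripExt (name : String) : String :=
  String.ofList (PySem.List.slice name.toList none (some (-10)))
def stripXst (name : String) : String :=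
  String.ofList (PySem.List.slice name.toList none (some (-9)))

def discover_paired_columns_py (fieldnames : List String) : List String :=
  let extracted_bases : PySem.Set String :=
    PySem.Set.ofList (fieldnames.filterMap (fun name =>
      if PySem.Str.endswith name "_extracted" then some (stripExt name) else none))
  let existing_bases : PySem.Set String :=
    PySem.Set.ofList (fieldnames.filterMap (fun name =>
      if PySem.Str.endswith name "_existing" then some (stripXst name) else none))
  PySem.List.sorted (PySem.Set.inter extracted_bases existing_bases) (fun x => x) false

-- ===== PORT B =====
def bStep (d : PySem.Dict String (Bool × Bool)) (name : String) : PySem.Dict String (Bool × Bool) :=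
  let d1 :=
    if PySem.Str.endswith name "_extracted" then
      let base := stripExt name
      let p := d.getD base (false, false)
      d.insert base (true, p.2)
    else d
  if PySem.Str.endswith name "_existing" then
    let base := stripXst name
    let p := d1.getD base (false, false)
    d1.insert base (p.1, true)
  else d1

def discover_paired_columns_py_alt (fieldnames : List String) : List String :=
  let flags := fieldnames.foldl bStep PySem.Dict.empty
  PySem.List.sorted ((flags.items.filter (fun p => p.2.1 && p.2.2)).map Prod.fst) (fun x => x) false

-- ===== PRECONDITION & SPEC =====
def Spec_discover_paired_columns_py (fieldnames : List String) (out : List String) : Prop := out = discover_paired_columns_py_alt fieldnames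
instance (fieldnames : List String) (out : List String) : Decidable (Spec_discover_paired_columns_py fieldnames out) := by unfold Spec_discover_paired_columns_py; infer_instance

-- ===== CLAIM (what is proved, stated in full; the proofs are below) =====
def Claim_equal_discover_paired_columns_py : Prop := ∀ (fieldnames : List String), Dom_discover_paired_columns_py fieldnames → Spec_discover_paired_columns_py fieldnames (discover_paired_columns_py fieldnames)

-- ===== LEMMAS AND PROOFS =====

-- endswith + strip characterisation: name ends with the suffix and strips to b  ↔  name = b ++ suffix
theorem strip_ext_iff (n b : String) :
    (PySem.Str.endswith n "_extracted" = true ∧ stripExt n = b) ↔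
      n.toList = b.toList ++ ['_', 'e', 'x', 't', 'r', 'a', 'c', 't', 'e', 'd'] := by
  constructor
  · rintro ⟨he, rfl⟩
    rw [PySem.Str.endswith_eq] at he
    obtain ⟨t, ht⟩ := (PySem.Chars.endswith_iff _ _).mp he
    unfold stripExt
    rw [PySem.List.slice_to_neg_ofNat n.toList 10 (by norm_num), ← ht]
    have hl : (t ++ "_extracted".toList).length - 10 = t.length := by
      simp [List.length_append]
    rw [hl, List.take_left]
    simp
  · intro h
    have he : PySem.Str.endswith n "_extracted" = true := by
      rw [PySem.Str.endswith_eq]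
      exact (PySem.Chars.endswith_iff _ _).mpr ⟨b.toList, h.symm⟩
    refine ⟨he, ?_⟩
    unfold stripExt
    rw [PySem.List.slice_to_neg_ofNat n.toList 10 (by norm_num), h]
    have hl : (b.toList ++ ['_', 'e', 'x', 't', 'r', 'a', 'c', 't', 'e', 'd']).length - 10 = b.toList.length := by
      simp [List.length_append]
    rw [hl, List.take_left]
    exact String.ofList_toList

theorem strip_xst_iff (n b : String) :
    (PySem.Str.endswith n "_existing" = true ∧ stripXst n = b) ↔
      n.toList = b.toList ++ ['_', 'e', 'x', 'i', 's', 't', 'i', 'n', 'g'] := by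
  constructor
  · rintro ⟨he, rfl⟩
    rw [PySem.Str.endswith_eq] at he
    obtain ⟨t, ht⟩ := (PySem.Chars.endswith_iff _ _).mp he
    unfold stripXst
    rw [PySem.List.slice_to_neg_ofNat n.toList 9 (by norm_num), ← ht]
    have hl : (t ++ "_existing".toList).length - 9 = t.length := by
      simp [List.length_append]
    rw [hl, List.take_left]
    simp
  · intro h
    have he : PySem.Str.endswith n "_existing" = true := by
      rw [PySem.Str.endswith_eq]
      exact (PySem.Chars.endswith_iff _ _).mpr ⟨b.toList, h.symm⟩
    refine ⟨he, ?_⟩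
    unfold stripXst
    rw [PySem.List.slice_to_neg_ofNat n.toList 9 (by norm_num), h]
    have hl : (b.toList ++ ['_', 'e', 'x', 'i', 's', 't', 'i', 'n', 'g']).length - 9 = b.toList.length := by
      simp [List.length_append]
    rw [hl, List.take_left]
    exact String.ofList_toList

theorem not_both_suffix (n : String) :
    ¬ (PySem.Str.endswith n "_extracted" = true ∧ PySem.Str.endswith n "_existing" = true) := by
  rintro ⟨h1, h2⟩
  rw [PySem.Str.endswith_eq] at h1 h2
  have s1 := (PySem.Chars.endswith_iff _ _).mp h1
  have s2 := (PySem.Chars.endswith_iff _ _).mp h2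
  have : ("_existing".toList) <:+ ("_extracted".toList) :=
    List.suffix_of_suffix_length_le s2 s1 (by decide)
  exact absurd this (by decide)

theorem bStep_getD (d : PySem.Dict String (Bool × Bool)) (n b : String) :
    (bStep d n).getD b (false, false) =
      ((d.getD b (false, false)).1 || decide (n.toList = b.toList ++ ['_', 'e', 'x', 't', 'r', 'a', 'c', 't', 'e', 'd']),
       (d.getD b (false, false)).2 || decide (n.toList = b.toList ++ ['_', 'e', 'x', 'i', 's', 't', 'i', 'n', 'g'])) := by
  have hE := strip_ext_iff n b
  have hX := strip_xst_iff n b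
  by_cases h1 : PySem.Str.endswith n "_extracted" = true <;>
    by_cases h2 : PySem.Str.endswith n "_existing" = true
  · exact absurd ⟨h1, h2⟩ (not_both_suffix n)
  · have h1' : PySem.Chars.endswith n.toList ['_', 'e', 'x', 't', 'r', 'a', 'c', 't', 'e', 'd'] = true := by
      rw [PySem.Str.endswith_eq] at h1; exact h1
    have h2' : PySem.Chars.endswith n.toList ['_', 'e', 'x', 'i', 's', 't', 'i', 'n', 'g'] = false := by
      rw [PySem.Str.endswith_eq] at h2; exact Bool.eq_false_iff.mpr h2
    have hxf : ¬ (n.toList = b.toList ++ ['_', 'e', 'x', 'i', 's', 't', 'i', 'n', 'g']) :=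
      fun h => h2 (hX.mpr h).1
    by_cases hb : stripExt n = b
    · have hetb : decide (n.toList = b.toList ++ ['_', 'e', 'x', 't', 'r', 'a', 'c', 't', 'e', 'd']) = true := by
        simp only [decide_eq_true_eq]; exact hE.mp ⟨h1, hb⟩
      have hxfb : decide (n.toList = b.toList ++ ['_', 'e', 'x', 'i', 's', 't', 'i', 'n', 'g']) = false := by
        simp only [decide_eq_false_iff_not]; exact hxf
      subst hb
      simp [bStep, h1', h2', PySem.Dict.getD_insert_self, hetb, hxfb]
    · have hb' : ¬ (b = stripExt n) := fun h => hb h.symm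
      have het : ¬ (n.toList = b.toList ++ ['_', 'e', 'x', 't', 'r', 'a', 'c', 't', 'e', 'd']) :=
        fun h => hb (hE.mpr h).2
      simp [bStep, h1', h2', PySem.Dict.getD_insert, hb', het, hxf]
  · have h1' : PySem.Chars.endswith n.toList ['_', 'e', 'x', 't', 'r', 'a', 'c', 't', 'e', 'd'] = false := by
      rw [PySem.Str.endswith_eq] at h1; exact Bool.eq_false_iff.mpr h1
    have h2' : PySem.Chars.endswith n.toList ['_', 'e', 'x', 'i', 's', 't', 'i', 'n', 'g'] = true := by
      rw [PySem.Str.endswith_eq] at h2; exact h2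
    have hef : ¬ (n.toList = b.toList ++ ['_', 'e', 'x', 't', 'r', 'a', 'c', 't', 'e', 'd']) :=
      fun h => h1 (hE.mpr h).1
    by_cases hb : stripXst n = b
    · have hxtb : decide (n.toList = b.toList ++ ['_', 'e', 'x', 'i', 's', 't', 'i', 'n', 'g']) = true := by
        simp only [decide_eq_true_eq]; exact hX.mp ⟨h2, hb⟩
      have hefb : decide (n.toList = b.toList ++ ['_', 'e', 'x', 't', 'r', 'a', 'c', 't', 'e', 'd']) = false := by
        simp only [decide_eq_false_iff_not]; exact hef
      subst hb
      simp [bStep, h1', h2', PySem.Dict.getD_insert_self, hefb, hxtb]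
    · have hb' : ¬ (b = stripXst n) := fun h => hb h.symm
      have hxt : ¬ (n.toList = b.toList ++ ['_', 'e', 'x', 'i', 's', 't', 'i', 'n', 'g']) :=
        fun h => hb (hX.mpr h).2
      simp [bStep, h1', h2', PySem.Dict.getD_insert, hb', hef, hxt]
  · have h1' : PySem.Chars.endswith n.toList ['_', 'e', 'x', 't', 'r', 'a', 'c', 't', 'e', 'd'] = false := by
      rw [PySem.Str.endswith_eq] at h1; exact Bool.eq_false_iff.mpr h1
    have h2' : PySem.Chars.endswith n.toList ['_', 'e', 'x', 'i', 's', 't', 'i', 'n', 'g'] = false := by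
      rw [PySem.Str.endswith_eq] at h2; exact Bool.eq_false_iff.mpr h2
    have hef : ¬ (n.toList = b.toList ++ ['_', 'e', 'x', 't', 'r', 'a', 'c', 't', 'e', 'd']) :=
      fun h => h1 (hE.mpr h).1
    have hxf : ¬ (n.toList = b.toList ++ ['_', 'e', 'x', 'i', 's', 't', 'i', 'n', 'g']) :=
      fun h => h2 (hX.mpr h).1
    simp [bStep, h1', h2', hef, hxf]

theorem foldl_bStep_getD (l : List String) (d : PySem.Dict String (Bool × Bool)) (b : String) :
    (l.foldl bStep d).getD b (false, false) =
      ((d.getD b (false, false)).1 || l.any (fun n => decide (n.toList = b.toList ++ ['_', 'e', 'x', 't', 'r', 'a', 'c', 't', 'e', 'd'])),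
       (d.getD b (false, false)).2 || l.any (fun n => decide (n.toList = b.toList ++ ['_', 'e', 'x', 'i', 's', 't', 'i', 'n', 'g']))) := by
  induction l generalizing d with
  | nil => simp
  | cons n l ih =>
    simp only [List.foldl_cons, List.any_cons]
    rw [ih, bStep_getD]
    simp [Bool.or_assoc]

theorem bStep_keys_nodup (d : PySem.Dict String (Bool × Bool)) (n : String)
    (h : d.keys.Nodup) : (bStep d n).keys.Nodup := by
  unfold bStep
  split_ifs <;> try exact h
  all_goals first
    | exact PySem.Dict.nodup_keys_insert _ _ _ h
    | exact PySem.Dict.nodup_keys_insert _ _ _ (PySem.Dict.nodup_keys_insert _ _ _ h)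

theorem foldl_bStep_keys_nodup (l : List String) (d : PySem.Dict String (Bool × Bool))
    (h : d.keys.Nodup) : (l.foldl bStep d).keys.Nodup := by
  induction l generalizing d with
  | nil => exact h
  | cons n l ih => exact ih _ (bStep_keys_nodup _ _ h)

-- membership characterisation of B's pre-sort list
theorem mem_alt_list (fieldnames : List String) (x : String) :
    x ∈ (((fieldnames.foldl bStep PySem.Dict.empty).items.filter (fun p => p.2.1 && p.2.2)).map Prod.fst) ↔
      ((∃ n ∈ fieldnames, n.toList = x.toList ++ ['_', 'e', 'x', 't', 'r', 'a', 'c', 't', 'e', 'd']) ∧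
       (∃ n ∈ fieldnames, n.toList = x.toList ++ ['_', 'e', 'x', 'i', 's', 't', 'i', 'n', 'g'])) := by
  have hnd : (fieldnames.foldl bStep PySem.Dict.empty).keys.Nodup :=
    foldl_bStep_keys_nodup _ _ PySem.Dict.nodup_keys_empty
  have hgetD : (fieldnames.foldl bStep PySem.Dict.empty).getD x (false, false) =
      (fieldnames.any (fun n => decide (n.toList = x.toList ++ ['_', 'e', 'x', 't', 'r', 'a', 'c', 't', 'e', 'd'])),
       fieldnames.any (fun n => decide (n.toList = x.toList ++ ['_', 'e', 'x', 'i', 's', 't', 'i', 'n', 'g']))) := by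
    rw [foldl_bStep_getD]
    simp [PySem.Dict.getD_empty]
  constructor
  · intro hx
    obtain ⟨p, hp, hpx⟩ := List.mem_map.mp hx
    obtain ⟨hpi, hpf⟩ := List.mem_filter.mp hp
    have hpf' : p.2.1 = true ∧ p.2.2 = true := by simpa using hpf
    have hv : p.2 = (true, true) := by rw [Prod.ext_iff]; exact ⟨hpf'.1, hpf'.2⟩
    have hpd : (fieldnames.foldl bStep PySem.Dict.empty).getD p.1 (false, false) = p.2 :=
      PySem.Dict.getD_of_mem_items _ hpi hnd (false, false)
    rw [hpx, hgetD] at hpd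
    rw [hv] at hpd
    have h1 := congrArg Prod.fst hpd
    have h2 := congrArg Prod.snd hpd
    simp only [List.any_eq_true, decide_eq_true_eq] at h1 h2
    exact ⟨h1, h2⟩
  · rintro ⟨h1, h2⟩
    have hd : (fieldnames.foldl bStep PySem.Dict.empty).getD x (false, false) = (true, true) := by
      rw [hgetD, Prod.ext_iff]
      constructor <;> simp only [List.any_eq_true, decide_eq_true_eq]
      · exact h1
      · exact h2
    have hsome : (fieldnames.foldl bStep PySem.Dict.empty).get? x = some (true, true) := by
      rcases hg : (fieldnames.foldl bStep PySem.Dict.empty).get? x with _ | v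
      · rw [PySem.Dict.getD_eq_get?_getD, hg, Option.getD_none] at hd
        exact absurd hd (by decide)
      · rw [PySem.Dict.getD_eq_get?_getD, hg, Option.getD_some] at hd
        rw [hd]
    have hmem : (x, (true, true)) ∈ (fieldnames.foldl bStep PySem.Dict.empty).items :=
      PySem.Dict.mem_items_of_get?_eq_some _ hsome
    exact List.mem_map.mpr ⟨(x, (true, true)), List.mem_filter.mpr ⟨hmem, by simp⟩, rfl⟩

-- membership characterisation of A's pre-sort list
theorem mem_a_list (fieldnames : List String) (x : String) :
    x ∈ PySem.Set.inter
        (PySem.Set.ofList (fieldnames.filterMap (fun name =>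
          if PySem.Str.endswith name "_extracted" = true then some (stripExt name) else none)))
        (PySem.Set.ofList (fieldnames.filterMap (fun name =>
          if PySem.Str.endswith name "_existing" = true then some (stripXst name) else none))) ↔
      ((∃ n ∈ fieldnames, n.toList = x.toList ++ ['_', 'e', 'x', 't', 'r', 'a', 'c', 't', 'e', 'd']) ∧
       (∃ n ∈ fieldnames, n.toList = x.toList ++ ['_', 'e', 'x', 'i', 's', 't', 'i', 'n', 'g'])) := by
  rw [PySem.Set.mem_inter, PySem.Set.mem_ofList, PySem.Set.mem_ofList, List.mem_filterMap, List.mem_filterMap]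
  constructor
  · rintro ⟨⟨n1, hn1, he1⟩, ⟨n2, hn2, he2⟩⟩
    refine ⟨⟨n1, hn1, ?_⟩, ⟨n2, hn2, ?_⟩⟩
    · by_cases h : PySem.Str.endswith n1 "_extracted" = true
      · rw [if_pos h, Option.some.injEq] at he1
        exact (strip_ext_iff n1 x).mp ⟨h, he1⟩
      · rw [if_neg h] at he1
        exact absurd he1 (by simp)
    · by_cases h : PySem.Str.endswith n2 "_existing" = true
      · rw [if_pos h, Option.some.injEq] at he2
        exact (strip_xst_iff n2 x).mp ⟨h, he2⟩
      · rw [if_neg h] at he2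
        exact absurd he2 (by simp)
  · rintro ⟨⟨n1, hn1, he1⟩, ⟨n2, hn2, he2⟩⟩
    obtain ⟨c1, s1⟩ := (strip_ext_iff n1 x).mpr he1
    obtain ⟨c2, s2⟩ := (strip_xst_iff n2 x).mpr he2
    exact ⟨⟨n1, hn1, by rw [if_pos c1, s1]⟩, ⟨n2, hn2, by rw [if_pos c2, s2]⟩⟩

-- ===== VERDICT (by name: the statement is the Claim_ definition above) =====
theorem discover_paired_columns_py_spec : Claim_equal_discover_paired_columns_py := by
  intro fieldnames _
  unfold Spec_discover_paired_columns_py discover_paired_columns_py discover_paired_columns_py_alt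
  apply PySem.List.sorted_eq_sorted_of_perm _ _ _ (Function.injective_id)
  have hndA : (PySem.Set.inter
      (PySem.Set.ofList (fieldnames.filterMap (fun name =>
        if PySem.Str.endswith name "_extracted" = true then some (stripExt name) else none)))
      (PySem.Set.ofList (fieldnames.filterMap (fun name =>
        if PySem.Str.endswith name "_existing" = true then some (stripXst name) else none)))).Nodup :=
    PySem.Set.nodup_inter _ _ (PySem.Set.nodup_ofList _)
  have hndB : ((((fieldnames.foldl bStep PySem.Dict.empty).items.filter
      (fun p => p.2.1 && p.2.2)).map Prod.fst)).Nodup := by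
    have hsub : ((((fieldnames.foldl bStep PySem.Dict.empty).items.filter
        (fun p => p.2.1 && p.2.2)).map Prod.fst)).Sublist
        ((fieldnames.foldl bStep PySem.Dict.empty).items.map Prod.fst) :=
      List.Sublist.map _ List.filter_sublist
    have hk := foldl_bStep_keys_nodup fieldnames _ PySem.Dict.nodup_keys_empty
    exact hsub.nodup hk
  rw [List.perm_ext_iff_of_nodup hndA hndB]
  intro x
  rw [mem_a_list, mem_alt_list]
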